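-- pv_equiv track=rewrite | github.com/nageseio/The-Huxley | Projeto/New.py | SepararUm1
-- ===== SOURCE A (Python) =====
-- def SepararUm1(Lista, Cont, ListaTermos, MAX):#Sepera os termos em listas diferentes, pela quantidade de 1's em cada termo.
--     l=[]
--     if Cont > MAX:
--         return ListaTermos
--     for i in Lista:
--         C1 = 0
--         for i2 in range(2, len(i)):
--             if i[i2] == 1:
--                 C1+=1
--         if C1 == Cont:
--             l.append(i)
--     ListaTermos.append(l)
--     Cont+=1
--     return SepararUm1(Lista, Cont, ListaTermos, MAX)
-- ===== SOURCE B (Python) =====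
-- def SepararUm1(Lista, Cont, ListaTermos, MAX):
--     # Single pass: count the 1's of each term once, bucket terms by that count,
--     # then emit one bucket per value Cont..MAX.  Mutates ListaTermos like A does.
--     if Cont > MAX:
--         return ListaTermos
--     buckets = {}
--     for term in Lista:
--         buckets.setdefault(term[2:].count(1), []).append(term)
--     for c in range(Cont, MAX + 1):
--         ListaTermos.append(buckets.get(c, []))
--     return ListaTermos
-- ===== Notes on version B (the rewrite author's own statement) =====
-- stated objective: alternative
-- what changed: B makes one pass that counts each term's 1's once and buckets terms by that count in a dict, then appends one bucket per value Cont..MAX, instead of A's recursion that rescans all of Lista for every count value.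
import Mathlib
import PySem

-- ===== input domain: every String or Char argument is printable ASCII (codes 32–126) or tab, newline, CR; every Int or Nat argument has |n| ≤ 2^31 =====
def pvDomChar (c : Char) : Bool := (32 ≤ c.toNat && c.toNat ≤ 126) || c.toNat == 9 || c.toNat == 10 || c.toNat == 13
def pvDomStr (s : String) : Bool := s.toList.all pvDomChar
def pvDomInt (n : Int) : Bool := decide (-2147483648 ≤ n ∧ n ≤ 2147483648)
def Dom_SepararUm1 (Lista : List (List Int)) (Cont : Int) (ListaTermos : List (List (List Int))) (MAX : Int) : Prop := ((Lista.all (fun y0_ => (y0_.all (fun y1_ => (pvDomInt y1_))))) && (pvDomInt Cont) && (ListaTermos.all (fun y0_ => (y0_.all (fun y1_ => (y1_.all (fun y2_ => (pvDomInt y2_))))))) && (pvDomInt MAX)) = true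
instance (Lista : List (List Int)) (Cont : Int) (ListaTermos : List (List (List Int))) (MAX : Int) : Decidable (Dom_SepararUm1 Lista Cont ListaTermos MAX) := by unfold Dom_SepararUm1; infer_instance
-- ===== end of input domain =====

-- B buckets terms by their count of 1's in one pass instead of rescanning Lista per count value
-- (alternative algorithm; A and B both mutate ListaTermos in Python, identically — the equivalence here is about the return value).

-- ===== PORT A =====
-- inner loop: C1 = number of positions i2 in range(2, len(i)) with i[i2] == 1
def pvRowOnesA (i : List Int) : Int :=
  (PySem.List.pyRange 2 (PySem.List.len i) 1).foldl
    (fun C1 i2 => if PySem.List.pyGetD i i2 0 = 1 then C1 + 1 else C1) 0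

def SepararUm1 (Lista : List (List Int)) (Cont : Int) (ListaTermos : List (List (List Int))) (MAX : Int) : List (List (List Int)) :=
  if Cont > MAX then ListaTermos
  else
    let l := Lista.foldl (fun l i => if pvRowOnesA i = Cont then l ++ [i] else l) []
    SepararUm1 Lista (Cont + 1) (ListaTermos ++ [l]) MAX
termination_by (MAX + 1 - Cont).toNat
decreasing_by omega

-- ===== PORT B =====
-- term[2:].count(1), as an Int (the dict key)
def pvKeyB (term : List Int) : Int :=
  ((PySem.List.count (PySem.List.slice term (some 2) none) 1 : Nat) : Int)

-- buckets.setdefault(k, []).append(term)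
def pvBucketsB (Lista : List (List Int)) : PySem.Dict Int (List (List Int)) :=
  Lista.foldl
    (fun d term => d.insert (pvKeyB term) (d.getD (pvKeyB term) [] ++ [term]))
    PySem.Dict.empty

def SepararUm1_alt (Lista : List (List Int)) (Cont : Int) (ListaTermos : List (List (List Int))) (MAX : Int) : List (List (List Int)) :=
  if Cont > MAX then ListaTermos
  else
    let buckets := pvBucketsB Lista
    (PySem.List.pyRange Cont (MAX + 1) 1).foldl
      (fun LT c => LT ++ [buckets.getD c []]) ListaTermos

-- ===== PRECONDITION & SPEC =====
-- A opens one Python stack frame per count value Cont..MAX and raises RecursionError once that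
-- depth exhausts Python's ~1000-frame stack (measured: the exact cutoff is 945..996 depending on
-- how deep the caller already is); Pre_ excludes that raising regime at 900, which also drops the
-- narrow ambient-stack-dependent band ~901..996 on which A may still return (see claim cites).
def Pre_SepararUm1 (Lista : List (List Int)) (Cont : Int) (ListaTermos : List (List (List Int))) (MAX : Int) : Prop :=
  MAX - Cont ≤ 900
instance (Lista : List (List Int)) (Cont : Int) (ListaTermos : List (List (List Int))) (MAX : Int) : Decidable (Pre_SepararUm1 Lista Cont ListaTermos MAX) := by unfold Pre_SepararUm1; infer_instance

def pvWitness_SepararUm1 : List (List Int) × Int × List (List (List Int)) × Int :=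
  ([[1, 0, 1, 1], [0, 1, 0], [1, 1]], 0, [], 2)

def Spec_SepararUm1 (Lista : List (List Int)) (Cont : Int) (ListaTermos : List (List (List Int))) (MAX : Int) (out : List (List (List Int))) : Prop := out = SepararUm1_alt Lista Cont ListaTermos MAX
instance (Lista : List (List Int)) (Cont : Int) (ListaTermos : List (List (List Int))) (MAX : Int) (out : List (List (List Int))) : Decidable (Spec_SepararUm1 Lista Cont ListaTermos MAX out) := by unfold Spec_SepararUm1; infer_instance

-- ===== CLAIM (what is proved, stated in full; the proofs are below) =====
def Claim_equal_SepararUm1 : Prop := ∀ (Lista : List (List Int)) (Cont : Int) (ListaTermos : List (List (List Int))) (MAX : Int), Dom_SepararUm1 Lista Cont ListaTermos MAX → Pre_SepararUm1 Lista Cont ListaTermos MAX → Spec_SepararUm1 Lista Cont ListaTermos MAX (SepararUm1 Lista Cont ListaTermos MAX)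

-- ===== LEMMAS AND PROOFS =====

-- A's inner count equals B's key
theorem pvRow_eq_key (i : List Int) : pvRowOnesA i = pvKeyB i := by
  unfold pvRowOnesA pvKeyB
  rw [PySem.List.slice_from i (by norm_num), PySem.List.count_eq]
  have h := PySem.List.foldl_pyRange_pyGetD i 0
      (fun (C1 : Int) x => if x = 1 then C1 + 1 else C1) 0 (a := 2) (by norm_num)
  simp only [PySem.List.len] at h ⊢
  rw [h]
  simpa [List.count] using
    PySem.List.foldl_count_if (fun x : Int => x == 1) (List.drop (Int.toNat 2) i) 0

-- the bucket dict characterised: getD c is the sublist of terms whose key is c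
theorem pvBuckets_getD (Lista : List (List Int)) (d : PySem.Dict Int (List (List Int))) (c : Int) :
    (Lista.foldl
      (fun d term => d.insert (pvKeyB term) (d.getD (pvKeyB term) [] ++ [term])) d).getD c []
    = d.getD c [] ++ Lista.filter (fun t => pvKeyB t == c) := by
  induction Lista generalizing d with
  | nil => simp
  | cons t L ih =>
      simp only [List.foldl_cons, List.filter_cons, ih, PySem.Dict.getD_insert]
      by_cases h : pvKeyB t = c
      · simp [h]
      · simp [h, Ne.symm h, beq_iff_eq]

-- B equals the range fold unconditionally (empty range when Cont > MAX)
theorem alt_eq_fold (Lista : List (List Int)) (Cont : Int) (ListaTermos : List (List (List Int))) (MAX : Int) :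
    SepararUm1_alt Lista Cont ListaTermos MAX
    = (PySem.List.pyRange Cont (MAX + 1) 1).foldl
        (fun LT c => LT ++ [(pvBucketsB Lista).getD c []]) ListaTermos := by
  unfold SepararUm1_alt
  by_cases h : Cont > MAX
  · rw [if_pos h, PySem.List.pyRange_one_eq_nil (by omega)]
    rfl
  · rw [if_neg h]

theorem SepararUm1_spec : Claim_equal_SepararUm1 := by
  intro Lista Cont ListaTermos MAX _hD _hP
  unfold Spec_SepararUm1
  rw [alt_eq_fold]
  clear _hD _hP
  induction hn : (MAX + 1 - Cont).toNat generalizing Cont ListaTermos with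
  | zero =>
      unfold SepararUm1
      rw [if_pos (by omega), PySem.List.pyRange_one_eq_nil (by omega)]
      rfl
  | succ n ih =>
      unfold SepararUm1
      rw [if_neg (by omega),
          PySem.List.pyRange_one_cons (by omega : Cont < MAX + 1),
          List.foldl_cons]
      have hA : Lista.foldl (fun l i => if pvRowOnesA i = Cont then l ++ [i] else l) []
          = (pvBucketsB Lista).getD Cont [] := by
        rw [PySem.List.foldl_append_ite_eq_filter (fun i => pvRowOnesA i = Cont)]
        unfold pvBucketsB
        rw [pvBuckets_getD]
        simp only [pvRow_eq_key, PySem.Dict.getD_empty, List.nil_append]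
        exact List.filter_congr (by intro x _; cases h : pvKeyB x == Cont <;> simp_all)
      rw [hA]
      exact ih (Cont + 1) _ (by omega)
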